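-- pv_equiv track=rewrite | github.com/jagriti04/Chanakya-Local-Friend | chanakya/agent_manager.py | _looks_like_referential_followup
-- ===== SOURCE A (Python) =====
-- def _looks_like_referential_followup(message: str) -> bool:
--     lowered = message.lower()
--     referential_markers = (
--         "do it",
--         "do that",
--         "that one",
--         "this one",
--         "now do it",
--         "now do that",
--         "update it",
--         "update that",
--         "fix it",
--         "modify it",
--         "change it",
--         "where is",
--         "where did",
--         "the code",
--         "the script",
--         "saved",
--         "previous",
--         "above",
--         "follow up",
--         "follow-up",
--     )
--     return any(marker in lowered for marker in referential_markers)
-- ===== SOURCE B (Python) =====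
-- _BY_FIRST = {
--     "d": ("do it", "do that"),
--     "t": ("that one", "this one", "the code", "the script"),
--     "n": ("now do it", "now do that"),
--     "u": ("update it", "update that"),
--     "f": ("fix it", "follow up", "follow-up"),
--     "m": ("modify it",),
--     "c": ("change it",),
--     "w": ("where is", "where did"),
--     "s": ("saved",),
--     "p": ("previous",),
--     "a": ("above",),
-- }
--
--
-- def _looks_like_referential_followup(message: str) -> bool:
--     lowered = message.lower()
--     for i, ch in enumerate(lowered):
--         for marker in _BY_FIRST.get(ch, ()):
--             if lowered.startswith(marker, i):
--                 return True
--     return False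
-- ===== Notes on version B (the rewrite author's own statement) =====
-- stated objective: alternative
-- what changed: Instead of running a separate whole-string substring search for each of the 20 markers, B makes one left-to-right scan of the lowered message and at each position looks up the current character in a dict keyed by first character, testing only the candidate markers with startswith.
import Mathlib
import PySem

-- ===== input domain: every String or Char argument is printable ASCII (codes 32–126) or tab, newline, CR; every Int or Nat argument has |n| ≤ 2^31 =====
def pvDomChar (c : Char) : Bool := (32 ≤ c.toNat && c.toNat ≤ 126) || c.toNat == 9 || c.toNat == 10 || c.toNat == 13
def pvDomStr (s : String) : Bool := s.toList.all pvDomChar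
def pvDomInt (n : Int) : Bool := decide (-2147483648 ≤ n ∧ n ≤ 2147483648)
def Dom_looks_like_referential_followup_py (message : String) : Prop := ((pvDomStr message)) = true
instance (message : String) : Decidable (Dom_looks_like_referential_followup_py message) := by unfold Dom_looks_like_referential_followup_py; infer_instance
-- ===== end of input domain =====

-- B replaces A's per-marker 'marker in lowered' substring searches by ONE left-to-right scan
-- of the lowered message with a first-character index of the markers (objective: alternative).

-- ===== PORT A =====
def pvMarkers : List String :=
  ["do it", "do that", "that one", "this one", "now do it", "now do that",
   "update it", "update that", "fix it", "modify it", "change it",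
   "where is", "where did", "the code", "the script", "saved",
   "previous", "above", "follow up", "follow-up"]

def looks_like_referential_followup_py (message : String) : Bool :=
  let lowered := PySem.Str.lower message
  pvMarkers.any (fun marker => PySem.Str.isIn marker lowered)

-- ===== PORT B =====
-- the literal dict _BY_FIRST of Source B (its one-character string keys are ported as Char)
def pvByFirst : PySem.Dict Char (List String) :=
  PySem.Dict.ofList
    [('d', ["do it", "do that"]),
     ('t', ["that one", "this one", "the code", "the script"]),
     ('n', ["now do it", "now do that"]),
     ('u', ["update it", "update that"]),
     ('f', ["fix it", "follow up", "follow-up"]),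
     ('m', ["modify it"]),
     ('c', ["change it"]),
     ('w', ["where is", "where did"]),
     ('s', ["saved"]),
     ('p', ["previous"]),
     ('a', ["above"])]

-- Source B's loop 'for i, ch in enumerate(lowered)' as structural recursion on the character list:
-- the recursion argument is the suffix lowered[i:], so 'lowered.startswith(marker, i)' is
-- 'marker.toList.isPrefixOf' of that suffix (exact: startswith at position i = prefix of the drop).
def pvScanB (l : List Char) : Bool :=
  match l with
  | [] => false
  | c :: t =>
      ((PySem.Dict.getD pvByFirst c []).any fun marker => marker.toList.isPrefixOf (c :: t))
      || pvScanB t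

def looks_like_referential_followup_py_alt (message : String) : Bool :=
  pvScanB (PySem.Str.lower message).toList

-- ===== PRECONDITION & SPEC =====
def Spec_looks_like_referential_followup_py (message : String) (out : Bool) : Prop := out = looks_like_referential_followup_py_alt message
instance (message : String) (out : Bool) : Decidable (Spec_looks_like_referential_followup_py message out) := by unfold Spec_looks_like_referential_followup_py; infer_instance

-- ===== CLAIM (what is proved, stated in full; the proofs are below) =====
def Claim_equal_looks_like_referential_followup_py : Prop := ∀ (message : String), Dom_looks_like_referential_followup_py message → Spec_looks_like_referential_followup_py message (looks_like_referential_followup_py message)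

-- ===== LEMMAS AND PROOFS =====

-- no marker is empty
lemma pvMarkers_ne_nil : ∀ m ∈ pvMarkers, m.toList ≠ [] := by decide

-- every candidate stored under c is a marker whose first character is c …
lemma pv_cand_sub (c : Char) (m : String) (hm : m ∈ PySem.Dict.getD pvByFirst c []) :
    m ∈ pvMarkers ∧ m.toList.head? = some c := by
  rw [PySem.Dict.getD_eq_get?_getD] at hm
  rcases hg : pvByFirst.get? c with _ | v
  · rw [hg] at hm; simp at hm
  · rw [hg] at hm; simp only [Option.getD_some] at hm
    simp only [PySem.Dict.get?, Option.map_eq_some_iff] at hg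
    obtain ⟨pr, hfind, hv⟩ := hg
    have hmem := List.mem_of_find?_eq_some hfind
    have hbeq := List.find?_some hfind
    subst hv
    fin_cases hmem <;> (simp at hbeq; subst hbeq; fin_cases hm <;> decide)

-- … and every marker is stored under its first character
lemma pv_cand_mem (c : Char) (m : String) (hm : m ∈ pvMarkers)
    (hh : m.toList.head? = some c) : m ∈ PySem.Dict.getD pvByFirst c [] := by
  have key : ∀ m' ∈ pvMarkers, m' ∈ PySem.Dict.getD pvByFirst (m'.toList.head?.getD ' ') [] := by
    decide
  have h := key m hm
  rw [hh, Option.getD_some] at h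
  exact h

-- the scan finds exactly the marker-infixes
lemma pvScanB_iff (l : List Char) :
    pvScanB l = true ↔ ∃ m ∈ pvMarkers, m.toList <:+: l := by
  induction l with
  | nil =>
      simp only [pvScanB]
      constructor
      · intro h; exact absurd h (by decide)
      · rintro ⟨m, hm, hi⟩
        exact absurd (List.infix_nil.mp hi) (pvMarkers_ne_nil m hm)
  | cons c t ih =>
      simp only [pvScanB, Bool.or_eq_true, ih, List.any_eq_true]
      constructor
      · rintro (⟨m, hm, hp⟩ | ⟨m, hm, hi⟩)
        · exact ⟨m, (pv_cand_sub c m hm).1,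
            (List.isPrefixOf_iff_prefix.mp hp).isInfix⟩
        · exact ⟨m, hm, hi.trans (List.suffix_cons c t).isInfix⟩
      · rintro ⟨m, hm, hi⟩
        rcases List.infix_cons_iff.mp hi with hp | hi'
        · left
          refine ⟨m, pv_cand_mem c m hm ?_, List.isPrefixOf_iff_prefix.mpr hp⟩
          rcases hml : m.toList with _ | ⟨a, t'⟩
          · exact absurd hml (pvMarkers_ne_nil m hm)
          · rw [hml] at hp
            rw [List.head?_cons, (List.cons_prefix_cons.mp hp).1]
        · exact Or.inr ⟨m, hm, hi'⟩

-- ===== VERDICT (by name: the statement is the Claim_ definition above) =====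
theorem looks_like_referential_followup_py_spec : Claim_equal_looks_like_referential_followup_py := by
  intro message _
  unfold Spec_looks_like_referential_followup_py
  unfold looks_like_referential_followup_py looks_like_referential_followup_py_alt
  rw [Bool.eq_iff_iff, List.any_eq_true, pvScanB_iff]
  simp only [PySem.Str.isIn_iff_infix, PySem.Str.toList_lower]
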